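-- pv_equiv track=rewrite | github.com/chowdhurysujan71/finbrain-backup--25th-Sep-2025 | utils/user_id_normalizer.py | validate_user_identifier
-- ===== SOURCE A (Python) =====
-- def validate_user_identifier(user_id: str) -> bool:
--     """
--     Validate that user identifier follows expected format
--
--     Args:
--         user_id: User identifier to validate
--
--     Returns:
--         True if valid, False otherwise
--     """
--     if not user_id or not isinstance(user_id, str):
--         return False
--
--     # Should be a SHA-256 hash (64 hex characters)
--     if len(user_id) == 64 and all(c in '0123456789abcdef' for c in user_id.lower()):
--         return True
--
--     # Legacy format validation (may be different)
--     if len(user_id) > 10:  # Reasonable minimum length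
--         return True
--
--     return False
-- ===== SOURCE B (Python) =====
-- def validate_user_identifier(user_id: str) -> bool:
--     # The 64-char hex branch is subsumed by the len > 10 branch, so a single
--     # length test gives the same answer on every input.
--     return isinstance(user_id, str) and len(user_id) > 10
-- ===== Notes on version B (the rewrite author's own statement) =====
-- stated objective: simpler
-- what changed: B replaces A's per-character hex scan and three-branch chain with a single O(1) length test, since any 64-character string already passes A's len>10 branch, making the hex branch redundant.
import Mathlib
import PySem

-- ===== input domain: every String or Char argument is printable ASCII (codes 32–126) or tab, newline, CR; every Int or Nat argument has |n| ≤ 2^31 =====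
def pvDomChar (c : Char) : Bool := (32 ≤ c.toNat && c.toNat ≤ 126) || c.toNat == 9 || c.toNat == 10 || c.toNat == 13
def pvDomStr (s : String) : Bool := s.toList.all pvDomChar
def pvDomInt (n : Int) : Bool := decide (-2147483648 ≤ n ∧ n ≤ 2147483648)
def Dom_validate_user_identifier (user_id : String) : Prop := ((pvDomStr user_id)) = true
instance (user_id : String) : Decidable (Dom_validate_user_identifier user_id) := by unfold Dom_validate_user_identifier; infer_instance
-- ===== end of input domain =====

-- B replaces A's hex scan and branch chain with a single length test; the 64-hex branch is redundant since 64 > 10.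

-- ===== PORT A =====
def validate_user_identifier (user_id : String) : Bool :=
  if PySem.Str.len user_id == 0 then false
  else if PySem.Str.len user_id == 64 &&
          (PySem.Str.lower user_id).toList.all
            (fun c => ("0123456789abcdef".toList).contains c) then true
  else if PySem.Str.len user_id > 10 then true
  else false

-- ===== PORT B =====
def validate_user_identifier_alt (user_id : String) : Bool :=
  decide (PySem.Str.len user_id > 10)

-- ===== PRECONDITION & SPEC =====
def Spec_validate_user_identifier (user_id : String) (out : Bool) : Prop := out = validate_user_identifier_alt user_id
instance (user_id : String) (out : Bool) : Decidable (Spec_validate_user_identifier user_id out) := by unfold Spec_validate_user_identifier; infer_instance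

-- ===== CLAIM (what is proved, stated in full; the proofs are below) =====
def Claim_equal_validate_user_identifier : Prop := ∀ (user_id : String), Dom_validate_user_identifier user_id → Spec_validate_user_identifier user_id (validate_user_identifier user_id)

-- ===== LEMMAS AND PROOFS =====

-- ===== VERDICT (by name: the statement is the Claim_ definition above) =====
theorem validate_user_identifier_spec : Claim_equal_validate_user_identifier := by
  intro user_id _
  unfold Spec_validate_user_identifier validate_user_identifier validate_user_identifier_alt
  split_ifs with h0 h64 h10 <;>
    simp_all [PySem.Str.len]
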